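-- pv_equiv track=rewrite | github.com/petchluvsyou/2110101-grader | 09_MoreDC_34.py | pattern5
-- ===== SOURCE A (Python) =====
-- def pattern5(N):
--     ans = []
--     for i in range(N):
--         ans.append([])
--         for j in range(N):
--             ans[i].append(0)
--     c = 1
--     for i in range(N):
--         for j in range(N-i):
--             ans[j][i+j]=c
--             c+=1
--     return ans
-- ===== SOURCE B (Python) =====
-- def pattern5(N):
--     ans = []
--     for row in range(N):
--         r = []
--         for col in range(N):
--             d = col - row
--             if d < 0:
--                 r.append(0)
--             else:
--                 r.append(d * N - d * (d - 1) // 2 + row + 1)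
--         ans.append(r)
--     return ans
-- ===== Notes on version B (the rewrite author's own statement) =====
-- stated objective: alternative
-- what changed: Replaces A's zero-initialization pass plus diagonal-order fill with a running counter by a single row-major pass that computes each cell from the closed form d*N - d*(d-1)//2 + row + 1 (d = col - row), 0 below the diagonal.
import Mathlib
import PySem

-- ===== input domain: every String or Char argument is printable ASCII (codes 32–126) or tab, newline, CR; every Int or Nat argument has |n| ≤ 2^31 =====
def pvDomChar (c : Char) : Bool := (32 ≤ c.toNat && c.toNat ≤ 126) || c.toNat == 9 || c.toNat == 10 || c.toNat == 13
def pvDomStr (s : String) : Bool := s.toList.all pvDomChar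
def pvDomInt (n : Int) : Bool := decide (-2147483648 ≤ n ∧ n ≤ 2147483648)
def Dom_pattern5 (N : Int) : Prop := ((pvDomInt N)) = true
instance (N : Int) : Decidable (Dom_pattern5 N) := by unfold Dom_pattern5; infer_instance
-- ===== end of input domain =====

-- B replaces A's zero-fill pass plus diagonal-order fill with a running counter
-- by a single row-major pass computing each cell from a closed form (alternative decomposition, same cost).

-- ===== PORT A =====
def pattern5 (N : Int) : List (List Int) :=
  -- ans = []; for i in range(N): ans.append([]); for j in range(N): ans[i].append(0)
  let ans : List (List Int) :=
    (PySem.List.pyRange 0 N 1).foldl (fun ans i =>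
      (PySem.List.pyRange 0 N 1).foldl (fun ans _j =>
        PySem.List.pySetD ans i (PySem.List.pyGetD ans i [] ++ [(0 : Int)]))
        (ans ++ [([] : List Int)])) []
  -- c = 1; for i in range(N): for j in range(N-i): ans[j][i+j] = c; c += 1
  let st :=
    (PySem.List.pyRange 0 N 1).foldl (fun (st : List (List Int) × Int) i =>
      (PySem.List.pyRange 0 (N - i) 1).foldl (fun (st : List (List Int) × Int) j =>
        (PySem.List.pySetD st.1 j
          (PySem.List.pySetD (PySem.List.pyGetD st.1 j []) (i + j) st.2), st.2 + 1)) st)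
      (ans, 1)
  st.1

-- ===== PORT B =====
def pattern5_alt (N : Int) : List (List Int) :=
  (PySem.List.pyRange 0 N 1).foldl (fun ans row =>
    ans ++ [(PySem.List.pyRange 0 N 1).foldl (fun r col =>
      r ++ [if col - row < 0 then (0 : Int)
            else (col - row) * N - PySem.Int.floordiv ((col - row) * (col - row - 1)) 2 + row + 1]) []]) []

-- ===== PRECONDITION & SPEC =====
def Spec_pattern5 (N : Int) (out : List (List Int)) : Prop := out = pattern5_alt N
instance (N : Int) (out : List (List Int)) : Decidable (Spec_pattern5 N out) := by unfold Spec_pattern5; infer_instance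

-- ===== CLAIM (what is proved, stated in full; the proofs are below) =====
def Claim_equal_pattern5 : Prop := ∀ (N : Int), Dom_pattern5 N → Spec_pattern5 N (pattern5 N)

-- ===== LEMMAS AND PROOFS =====

-- the closed-form cell value for col ≥ row
def pvG (N row col : Int) : Int :=
  (col - row) * N - PySem.Int.floordiv ((col - row) * (col - row - 1)) 2 + row + 1

-- matrix after diagonals < i are fully filled and diagonal i is filled in rows < j
def pvMid (n i j : Nat) : List (List Int) :=
  (List.range n).map (fun r => (List.range n).map (fun c =>
    if r ≤ c ∧ (c - r < i ∨ (c - r = i ∧ r < j)) then pvG (n : Int) (r : Int) (c : Int) else 0))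

-- counter value when diagonal i starts
def pvC (n i : Nat) : Int :=
  (i : Int) * (n : Int) - PySem.Int.floordiv ((i : Int) * ((i : Int) - 1)) 2 + 1

theorem pv_set_last {α : Type} (rows : List α) (r v : α) :
    (rows ++ [r]).set rows.length v = rows ++ [v] := by
  induction rows with
  | nil => rfl
  | cons h t ih => simp [ih]

theorem pv_getD_last {α : Type} (rows : List α) (r d : α) :
    (rows ++ [r]).getD rows.length d = r := by
  simp [List.getD]

theorem pv_set_map_range {β : Type} (f : Nat → β) (n j : Nat) (v : β) (hj : j < n) :
    ((List.range n).map f).set j v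
      = (List.range n).map (fun k => if k = j then v else f k) := by
  apply List.ext_getElem
  · simp
  · intro i h1 h2
    simp only [List.getElem_set, List.getElem_map, List.getElem_range]
    rcases eq_or_ne i j with rfl | hne
    · simp
    · rw [if_neg (fun h => hne h.symm), if_neg hne]

-- phase 1 inner loop: appending m zeros to the freshly appended last row
theorem pv_inner1 (m : Nat) (rows : List (List Int)) (r : List Int) (i : Int)
    (hi : i = (rows.length : Int)) :
    (PySem.List.pyRange 0 (m : Int) 1).foldl (fun ans _j =>
        PySem.List.pySetD ans i (PySem.List.pyGetD ans i [] ++ [(0 : Int)])) (rows ++ [r])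
      = rows ++ [r ++ List.replicate m 0] := by
  subst hi
  induction m generalizing r with
  | zero => simp [PySem.List.pyRange_one_eq_nil]
  | succ m ih =>
    have h : ((m + 1 : Nat) : Int) = (m : Int) + 1 := by push_cast; ring
    rw [h, PySem.List.pyRange_one_succ_right (by positivity), List.foldl_append, ih]
    simp only [List.foldl_cons, List.foldl_nil, PySem.List.pySetD_natCast,
      PySem.List.pyGetD_natCast, pv_getD_last, pv_set_last]
    rw [List.replicate_succ']
    simp

-- phase 1: the zero matrix
theorem pv_phase1 (n : Nat) : ∀ k : Nat, k ≤ n →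
    (PySem.List.pyRange 0 (k : Int) 1).foldl (fun ans i =>
      (PySem.List.pyRange 0 (n : Int) 1).foldl (fun ans _j =>
        PySem.List.pySetD ans i (PySem.List.pyGetD ans i [] ++ [(0 : Int)]))
        (ans ++ [([] : List Int)])) []
      = List.replicate k (List.replicate n 0) := by
  intro k hk
  induction k with
  | zero => simp [PySem.List.pyRange_one_eq_nil]
  | succ k ih =>
    have h : ((k + 1 : Nat) : Int) = (k : Int) + 1 := by push_cast; ring
    rw [h, PySem.List.pyRange_one_succ_right (by positivity), List.foldl_append,
      ih (by omega)]
    simp only [List.foldl_cons, List.foldl_nil]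
    rw [pv_inner1 n (List.replicate k (List.replicate n 0)) [] (k : Int) (by simp)]
    simp [List.replicate_succ']

theorem pv_mid_init (n : Nat) : pvMid n 0 0 = List.replicate n (List.replicate n 0) := by
  unfold pvMid
  apply List.ext_getElem
  · simp
  · intro r h1 h2
    simp only [List.getElem_map, List.getElem_range, List.getElem_replicate]
    apply List.ext_getElem
    · simp
    · intro c h3 h4
      simp only [List.getElem_map, List.getElem_range, List.getElem_replicate]
      rw [if_neg (by omega)]

-- finishing a diagonal is the same matrix as starting the next one
theorem pv_mid_roll (n i : Nat) (hi : i ≤ n) : pvMid n i (n - i) = pvMid n (i + 1) 0 := by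
  unfold pvMid
  apply List.map_congr_left; intro r hr
  apply List.map_congr_left; intro c hc
  simp only [List.mem_range] at hr hc
  congr 1
  simp only [eq_iff_iff]
  omega

-- counter increment across one diagonal
theorem pv_c_roll (n i : Nat) (hi : i ≤ n) :
    pvC n i + ((n - i : Nat) : Int) = pvC n (i + 1) := by
  unfold pvC
  rw [PySem.Int.floordiv_eq_ediv_of_pos (by norm_num),
    PySem.Int.floordiv_eq_ediv_of_pos (by norm_num)]
  have h1 : ((i : Int) + 1) * ((i : Int) + 1 - 1) = (i : Int) * ((i : Int) - 1) + (i : Int) * 2 := by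
    ring
  push_cast [h1]
  rw [Int.add_mul_ediv_right _ _ (by norm_num : (2 : Int) ≠ 0)]
  push_cast [Nat.cast_sub hi]
  ring

-- the value the counter holds at row j of diagonal i is the closed form
theorem pv_c_val (n i j : Nat) :
    pvC n i + (j : Int) = pvG (n : Int) (j : Int) ((i + j : Nat) : Int) := by
  unfold pvC pvG
  have e : ((i + j : Nat) : Int) - (j : Int) = (i : Int) := by push_cast; ring
  rw [e]
  ring

-- phase 2 inner loop: filling diagonal i row by row
theorem pv_inner2 (n i : Nat) (hi : i ≤ n) : ∀ j : Nat, j ≤ n - i →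
    (PySem.List.pyRange 0 ((j : Nat) : Int) 1).foldl (fun (st : List (List Int) × Int) j =>
        (PySem.List.pySetD st.1 j
          (PySem.List.pySetD (PySem.List.pyGetD st.1 j []) ((i : Int) + j) st.2), st.2 + 1))
      (pvMid n i 0, pvC n i)
      = (pvMid n i j, pvC n i + (j : Int)) := by
  intro j hj
  induction j with
  | zero => simp
  | succ j ih =>
    have h : ((j + 1 : Nat) : Int) = (j : Int) + 1 := by push_cast; ring
    rw [h, PySem.List.pyRange_one_succ_right (by positivity), List.foldl_append,
      ih (by omega)]
    simp only [List.foldl_cons, List.foldl_nil]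
    have hjn : j < n := by omega
    have hijn : i + j < n := by omega
    simp only [Prod.mk.injEq]
    refine ⟨?_, by ring⟩
    have hget : PySem.List.pyGetD (pvMid n i j) ((j : Nat) : Int) []
        = (List.range n).map (fun c =>
            if j ≤ c ∧ (c - j < i ∨ (c - j = i ∧ j < j)) then pvG (n : Int) (j : Int) (c : Int) else 0) := by
      rw [PySem.List.pyGetD_natCast]
      unfold pvMid
      exact PySem.List.getD_map_range _ n j _ hjn
    rw [hget]
    have hcast : (i : Int) + (j : Int) = ((i + j : Nat) : Int) := by push_cast; ring
    rw [hcast, PySem.List.pySetD_natCast, PySem.List.pySetD_natCast,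
      pv_set_map_range _ n (i + j) _ hijn]
    unfold pvMid
    rw [pv_set_map_range _ n j _ hjn]
    apply List.map_congr_left; intro r hr
    simp only [List.mem_range] at hr
    by_cases hrj : r = j
    · subst hrj
      rw [if_pos rfl]
      apply List.map_congr_left; intro c hc
      simp only [List.mem_range] at hc
      by_cases hcij : c = i + r
      · subst hcij
        rw [if_pos rfl, if_pos (by omega), pv_c_val]
      · rw [if_neg hcij]
        congr 1
        simp only [eq_iff_iff]
        omega
    · rw [if_neg hrj]
      apply List.map_congr_left; intro c hc
      simp only [List.mem_range] at hc
      congr 1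
      simp only [eq_iff_iff]
      omega

-- phase 2 outer loop
theorem pv_phase2 (n : Nat) : ∀ i : Nat, i ≤ n →
    (PySem.List.pyRange 0 ((i : Nat) : Int) 1).foldl (fun (st : List (List Int) × Int) i =>
      (PySem.List.pyRange 0 ((n : Int) - i) 1).foldl (fun (st : List (List Int) × Int) j =>
        (PySem.List.pySetD st.1 j
          (PySem.List.pySetD (PySem.List.pyGetD st.1 j []) (i + j) st.2), st.2 + 1)) st)
      (pvMid n 0 0, pvC n 0)
      = (pvMid n i 0, pvC n i) := by
  intro i hi
  induction i with
  | zero => simp [PySem.List.pyRange_one_eq_nil]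
  | succ i ih =>
    have h : ((i + 1 : Nat) : Int) = (i : Int) + 1 := by push_cast; ring
    rw [h, PySem.List.pyRange_one_succ_right (by positivity), List.foldl_append,
      ih (by omega)]
    simp only [List.foldl_cons, List.foldl_nil]
    have hsub : (n : Int) - (i : Int) = ((n - i : Nat) : Int) := by
      push_cast [Nat.cast_sub (by omega : i ≤ n)]; ring
    rw [hsub, pv_inner2 n i (by omega) (n - i) (le_refl _),
      pv_mid_roll n i (by omega), pv_c_roll n i (by omega)]

theorem pattern5_nat (n : Nat) : pattern5 ((n : Nat) : Int) = pvMid n n 0 := by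
  have hc0 : (1 : Int) = pvC n 0 := by
    unfold pvC
    rw [PySem.Int.floordiv_eq_ediv_of_pos (by norm_num)]
    norm_num
  have hpair : (List.replicate n (List.replicate n 0), (1 : Int)) = (pvMid n 0 0, pvC n 0) := by
    rw [pv_mid_init, ← hc0]
  simp only [pattern5]
  rw [pv_phase1 n n le_rfl, hpair, pv_phase2 n n le_rfl]

theorem pattern5_alt_nat (n : Nat) : pattern5_alt ((n : Nat) : Int) = pvMid n n 0 := by
  simp only [pattern5_alt]
  have hrow : ∀ row : Int,
      (PySem.List.pyRange 0 ((n : Nat) : Int) 1).foldl (fun r col =>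
        r ++ [if col - row < 0 then (0 : Int)
              else (col - row) * ((n : Nat) : Int) - PySem.Int.floordiv ((col - row) * (col - row - 1)) 2 + row + 1]) []
      = (PySem.List.pyRange 0 ((n : Nat) : Int) 1).map (fun col =>
          if col - row < 0 then (0 : Int)
          else (col - row) * ((n : Nat) : Int) - PySem.Int.floordiv ((col - row) * (col - row - 1)) 2 + row + 1) := by
    intro row
    rw [PySem.List.foldl_append_singleton_eq_map]
    simp
  rw [PySem.List.foldl_append_singleton_eq_map]
  simp only [List.nil_append]
  rw [List.map_congr_left (fun row _ => hrow row)]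
  rw [PySem.List.pyRange_one]
  simp only [List.map_map, Function.comp_def, Int.sub_zero, Int.toNat_natCast, zero_add]
  unfold pvMid
  apply List.map_congr_left; intro r hr
  apply List.map_congr_left; intro c hc
  simp only [List.mem_range] at hr hc
  by_cases hcr : c < r
  · rw [if_pos (by omega), if_neg (by omega)]
  · rw [if_neg (by omega), if_pos (by omega)]
    rfl

-- ===== VERDICT (by name: the statement is the Claim_ definition above) =====
theorem pattern5_spec : Claim_equal_pattern5 := by
  intro N _
  unfold Spec_pattern5
  by_cases hN : 0 ≤ N
  · obtain ⟨n, rfl⟩ : ∃ n : Nat, N = (n : Int) := ⟨N.toNat, (Int.toNat_of_nonneg hN).symm⟩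
    rw [pattern5_nat, pattern5_alt_nat]
  · have h : PySem.List.pyRange 0 N 1 = [] := PySem.List.pyRange_one_eq_nil (by omega)
    simp [pattern5, pattern5_alt, h]
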